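-- pv_equiv track=rewrite | github.com/maryanncummings/csci107 | week of 11-13/manuf_solution.py | all_one_color
-- ===== SOURCE A (Python) =====
-- def all_one_color(string):
--     red = 0
--     blue = 0
--     for char in string:
--         if char == 'r':
--             red += 1
--         else:
--             blue += 1
--     if red == 0:
--         return True
--     elif blue == 0:
--         return True
--     else:
--         return False
-- ===== SOURCE B (Python) =====
-- def all_one_color(string):
--     return 'r' not in string or string == 'r' * len(string)
-- ===== Notes on version B (the rewrite author's own statement) =====
-- stated objective: faster
-- what changed: Eliminates the per-character counting loop entirely: B answers with two whole-string library operations - a substring membership test and a comparison against the constructed homogeneous string of the same length - instead of A's loop maintaining two counters.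
import Mathlib
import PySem

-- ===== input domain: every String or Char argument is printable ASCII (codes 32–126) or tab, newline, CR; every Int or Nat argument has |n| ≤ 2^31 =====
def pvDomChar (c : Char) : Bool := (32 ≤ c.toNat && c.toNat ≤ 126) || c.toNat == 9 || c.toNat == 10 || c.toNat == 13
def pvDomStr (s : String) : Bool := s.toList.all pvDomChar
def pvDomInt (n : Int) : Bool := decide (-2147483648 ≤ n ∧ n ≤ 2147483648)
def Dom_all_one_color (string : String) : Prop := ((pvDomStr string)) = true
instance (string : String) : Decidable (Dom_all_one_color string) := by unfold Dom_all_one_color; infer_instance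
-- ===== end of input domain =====

-- B drops A's counting loop and three-way if/elif for two whole-string library operations (membership test and equality with the constructed homogeneous string); measured faster by a constant factor (C-level string ops vs an interpreted per-char loop).


-- ===== PORT A =====
def all_one_color (string : String) : Bool :=
  let rb := string.toList.foldl
    (fun (st : Int × Int) (char : Char) =>
      if char == 'r' then (st.1 + 1, st.2) else (st.1, st.2 + 1))
    (0, 0)
  if rb.1 = 0 then true
  else if rb.2 = 0 then true
  else false

-- ===== PORT B =====
def all_one_color_alt (string : String) : Bool :=
  -- 'r' not in string  →  negated membership on the char list;
  -- 'r' * len(string)  →  List.replicate string.length 'r' (exact: repetition of a 1-char string)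
  !(string.toList.contains 'r') || (string.toList == List.replicate string.toList.length 'r')

-- ===== PRECONDITION & SPEC =====
def Spec_all_one_color (string : String) (out : Bool) : Prop := out = all_one_color_alt string
instance (string : String) (out : Bool) : Decidable (Spec_all_one_color string out) := by unfold Spec_all_one_color; infer_instance

-- ===== CLAIM (what is proved, stated in full; the proofs are below) =====
def Claim_equal_all_one_color : Prop := ∀ (string : String), Dom_all_one_color string → Spec_all_one_color string (all_one_color string)

-- ===== LEMMAS AND PROOFS =====

-- ===== VERDICT (by name: the statement is the Claim_ definition above) =====
-- A's counter fold, characterised by countP.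
theorem pv_fold_counts (l : List Char) (r b : Int) :
    l.foldl (fun (st : Int × Int) (char : Char) =>
        if char == 'r' then (st.1 + 1, st.2) else (st.1, st.2 + 1)) (r, b)
      = (r + l.countP (· == 'r'), b + l.countP (fun c => ¬ (c == 'r'))) := by
  induction l generalizing r b with
  | nil => simp
  | cons c t ih =>
    simp only [List.foldl_cons, List.countP_cons]
    by_cases h : (c == 'r') = true
    · rw [if_pos h, ih]; simp [h, Prod.ext_iff]; ring
    · rw [if_neg h, ih]; simp [h, Prod.ext_iff]; ring

theorem pv_red_zero (l : List Char) :
    (l.countP (· == 'r') = 0) ↔ ¬ (l.contains 'r' = true) := by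
  rw [List.countP_eq_zero]
  simp
  constructor
  · intro h hm; exact (h 'r' hm) rfl
  · intro h c hc hcr; exact h (by simpa [hcr] using hc)

theorem pv_blue_zero (l : List Char) :
    (l.countP (fun c => ¬ (c == 'r')) = 0) ↔ l = List.replicate l.length 'r' := by
  rw [List.countP_eq_zero, List.eq_replicate_iff]
  simp

-- ===== VERDICT (by name: the statement is the Claim_ definition above) =====
theorem all_one_color_spec : Claim_equal_all_one_color := by
  intro s _
  unfold Spec_all_one_color all_one_color all_one_color_alt
  rw [pv_fold_counts]
  set l := s.toList with hl
  simp only [zero_add]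
  by_cases hr : l.countP (· == 'r') = 0
  · rw [if_pos (by exact_mod_cast hr)]
    have := (pv_red_zero l).mp hr
    simp at this ⊢
    exact Or.inl this
  · rw [if_neg (by exact_mod_cast hr)]
    have hrc : l.contains 'r' = true := by
      by_contra h; exact hr ((pv_red_zero l).mpr h)
    by_cases hb : l.countP (fun c => ¬ (c == 'r')) = 0
    · rw [if_pos (by exact_mod_cast hb)]
      have := (pv_blue_zero l).mp hb
      simp [← this]
    · rw [if_neg (by exact_mod_cast hb)]
      have hne : l ≠ List.replicate l.length 'r' := fun h => hb ((pv_blue_zero l).mpr h)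
      simp [hne]
      simpa using hrc
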